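-- pv_equiv track=rewrite | github.com/hariceratops/s2s | scripts/amalgam.py | remove_redundant_includes
-- ===== SOURCE A (Python) =====
-- def get_all_transitive_dependencies(file, graph, visited=None):
--     """Recursively gets all dependencies a file brings in."""
--     if visited is None:
--         visited = set()
--     if file in visited:
--         return set()
--     visited.add(file)
--
--     transitive_deps = set(graph.get(file, []))
--     for dep in graph.get(file, []):
--         transitive_deps |= get_all_transitive_dependencies(dep, graph, visited)
--
--     return transitive_deps
--
-- def remove_redundant_includes(graph):
--     """Removes redundant includes while ensuring all dependencies remain resolved."""
--     optimized_graph = {}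
--
--     for file, includes in graph.items():
--         # Get all transitive dependencies that would be included indirectly
--         transitive_deps = set()
--         for inc in includes:
--             transitive_deps |= get_all_transitive_dependencies(inc, graph)
--
--         # Keep only those includes that aren't covered by transitive dependencies
--         optimized_graph[file] = [inc for inc in includes if inc not in transitive_deps]
--
--     return optimized_graph
-- ===== SOURCE B (Python) =====
-- def remove_redundant_includes(graph):
--     """Removes redundant includes while ensuring all dependencies remain resolved.
--
--     Instead of a fresh recursive DFS per include, do one iterative stack
--     traversal per file starting from all of its includes at once, collecting
--     every dependency reachable in >= 1 step into `redundant`.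
--     """
--     optimized_graph = {}
--     for file, includes in graph.items():
--         seen = set(includes)
--         stack = list(includes)
--         redundant = set()
--         while stack:
--             node = stack.pop()
--             for dep in graph.get(node, []):
--                 redundant.add(dep)
--                 if dep not in seen:
--                     seen.add(dep)
--                     stack.append(dep)
--         optimized_graph[file] = [inc for inc in includes if inc not in redundant]
--     return optimized_graph
-- ===== Notes on version B (the rewrite author's own statement) =====
-- stated objective: alternative
-- what changed: A runs a fresh recursive DFS (with its own visited set) for every single include of every file and unions the results; B does one iterative worklist traversal per file seeded with all of that file's includes at once, collecting every dependency reachable in at least one step into a single 'redundant' set, so each file's reachable subgraph is explored once instead of once per include.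
import Mathlib
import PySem

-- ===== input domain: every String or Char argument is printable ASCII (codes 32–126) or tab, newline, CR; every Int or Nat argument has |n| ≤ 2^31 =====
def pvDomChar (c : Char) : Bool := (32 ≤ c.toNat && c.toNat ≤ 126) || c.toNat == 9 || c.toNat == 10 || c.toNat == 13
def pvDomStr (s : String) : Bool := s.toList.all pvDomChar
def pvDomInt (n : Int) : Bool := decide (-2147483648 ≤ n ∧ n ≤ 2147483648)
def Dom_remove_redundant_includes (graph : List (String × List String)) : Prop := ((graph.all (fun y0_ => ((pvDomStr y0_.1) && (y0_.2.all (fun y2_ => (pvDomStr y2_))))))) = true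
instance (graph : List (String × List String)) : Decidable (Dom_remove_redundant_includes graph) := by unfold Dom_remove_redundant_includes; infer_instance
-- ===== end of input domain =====

-- B replaces A's fresh recursive depth-first search per include with one iterative stack
-- traversal per file started from all of its includes at once (objective: alternative —
-- each file's reachable subgraph is explored once instead of once per include).

-- graph.get(f, []): first-match lookup on the association list (the dict convention)
def depsOf (graph : List (String × List String)) (f : String) : List String :=
  ((graph.find? (fun p => p.1 == f)).map (·.2)).getD []

-- ===== PORT A =====
-- get_all_transitive_dependencies: the shared mutable `visited` is threaded through the
-- fold, the pair being (returned set, visited). `fuel` is a totality guard only: started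
-- at (number of dependency occurrences)+1 it cannot run out, because every nested call
-- strictly grows `visited` inside the finite universe of dependency strings (the proof
-- below, `gatd_spec`, never reaches the fuel-0 branch).
def gatd (fuel : Nat) (g : List (String × List String)) (file : String)
    (visited : PySem.Set String) : PySem.Set String × PySem.Set String :=
  match fuel with
  | 0 => (PySem.Set.empty, visited)
  | fuel + 1 =>
    if PySem.Set.contains visited file then (PySem.Set.empty, visited)
    else
      let visited := PySem.Set.add visited file
      (depsOf g file).foldl
        (fun acc dep =>
          let r := gatd fuel g dep acc.2
          (PySem.Set.union acc.1 r.1, r.2))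
        (PySem.Set.ofList (depsOf g file), visited)

def remove_redundant_includes (graph : List (String × List String)) : List (String × List String) :=
  (graph.foldl
    (fun og p =>
      og.insert p.1 (p.2.filter (fun inc => !(PySem.Set.contains
        (p.2.foldl
          (fun s inc => PySem.Set.union s
            (gatd ((graph.flatMap (fun q => q.2)).length + 1) graph inc PySem.Set.empty).1)
          PySem.Set.empty) inc))))
    PySem.Dict.empty).items

-- ===== PORT B =====
-- the while-loop of Source B pops from the end of `stack`; for each dep of the popped node
-- it is added to `redundant` and pushed if unseen. `fuel` is a totality guard only (the
-- loop measure |values ∖ seen| + |stack| strictly decreases and the start value bounds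
-- it; the proof below, `bfs_spec`, never reaches the fuel-0 branch).
-- loop body of the 'for dep in graph.get(node, [])' loop in Source B
def bstep (_g : List (String × List String)) (_node : String)
    (acc : List String × PySem.Set String × PySem.Set String) (dep : String) :
    List String × PySem.Set String × PySem.Set String :=
  let red' := PySem.Set.add acc.2.2 dep
  if PySem.Set.contains acc.2.1 dep then (acc.1, acc.2.1, red')
  else (acc.1 ++ [dep], PySem.Set.add acc.2.1 dep, red')

def bfsRed (fuel : Nat) (g : List (String × List String))
    (stack : List String) (seen red : PySem.Set String) : PySem.Set String :=
  match fuel with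
  | 0 => red
  | fuel + 1 =>
    match PySem.List.pop? stack with
    | none => red
    | some (node, rest) =>
      let st := (depsOf g node).foldl (bstep g node) (rest, seen, red)
      bfsRed fuel g st.1 st.2.1 st.2.2

def remove_redundant_includes_alt (graph : List (String × List String)) : List (String × List String) :=
  (graph.foldl
    (fun og p =>
      og.insert p.1 (p.2.filter (fun inc => !(PySem.Set.contains
        (bfsRed ((graph.flatMap (fun q => q.2)).length + p.2.length + 1) graph p.2
          (PySem.Set.ofList p.2) PySem.Set.empty) inc))))
    PySem.Dict.empty).items

-- ===== PRECONDITION & SPEC =====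
def Spec_remove_redundant_includes (graph : List (String × List String)) (out : List (String × List String)) : Prop := out = remove_redundant_includes_alt graph
instance (graph : List (String × List String)) (out : List (String × List String)) : Decidable (Spec_remove_redundant_includes graph out) := by unfold Spec_remove_redundant_includes; infer_instance

-- ===== CLAIM (what is proved, stated in full; the proofs are below) =====
def Claim_equal_remove_redundant_includes : Prop := ∀ (graph : List (String × List String)), Dom_remove_redundant_includes graph → Spec_remove_redundant_includes graph (remove_redundant_includes graph)

-- ===== LEMMAS AND PROOFS =====

inductive AR (g : List (String × List String)) (V : List String) : String → String → Prop
  | refl {a : String} (h : a ∉ V) : AR g V a a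
  | tail {a b c : String} : AR g V a b → c ∈ depsOf g b → c ∉ V → AR g V a c

lemma AR_start {g : List (String × List String)} {V : List String} {a x : String}
    (h : AR g V a x) : a ∉ V := by
  induction h with
  | refl h => exact h
  | tail _ _ _ ih => exact ih

lemma AR_end {g : List (String × List String)} {V : List String} {a x : String}
    (h : AR g V a x) : x ∉ V := by
  cases h with
  | refl h => exact h
  | tail _ _ hc => exact hc

lemma AR_append {g : List (String × List String)} {V V2 : List String} {a b c x : String}
    (h1 : AR g V a b) (hc : c ∈ depsOf g b) (hcV : c ∉ V)
    (hsub : ∀ v ∈ V, v ∈ V2) (h2 : AR g V2 c x) : AR g V a x := by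
  induction h2 with
  | refl _ => exact AR.tail h1 hc hcV
  | tail _ hd hx ih => exact AR.tail ih hd (fun hm => hx (hsub _ hm))

lemma AR_closed {g : List (String × List String)} {V W : List String} {a x : String}
    (hcl : ∀ u ∈ W, u ∉ V → ∀ d ∈ depsOf g u, d ∈ W)
    (ha : a ∈ W) (h : AR g V a x) : x ∈ W := by
  induction h with
  | refl _ => exact ha
  | tail hab hd _ ih => exact hcl _ ih (AR_end hab) _ hd

lemma length_filter_le_of_imp {α : Type} {p q : α → Bool} (l : List α)
    (himp : ∀ x, q x = true → p x = true) :
    (l.filter q).length ≤ (l.filter p).length :=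
  (List.monotone_filter_right l himp).length_le

lemma length_filter_lt_of_imp {α : Type} {p q : α → Bool} {l : List α} {a : α}
    (himp : ∀ x, q x = true → p x = true) (ha : a ∈ l) (hpa : p a = true) (hqa : q a = false) :
    (l.filter q).length < (l.filter p).length := by
  induction l with
  | nil => cases ha
  | cons b t ih =>
    rcases List.mem_cons.1 ha with rfl | hat
    · have : (t.filter q).length ≤ (t.filter p).length := length_filter_le_of_imp t himp
      simp only [List.filter, hpa, hqa, List.length_cons]
      omega
    · have h1 := ih hat
      cases hq : q b
      · cases hp : p b <;> simp only [List.filter, hq, hp] <;> simp <;> omega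
      · have hp := himp b hq
        simp only [List.filter, hq, hp]
        simpa using h1
def GInv (g : List (String × List String)) (U : List String) (fuel : Nat) (f : String)
    (V : PySem.Set String) (acc : PySem.Set String × PySem.Set String) : Prop :=
  (∀ v ∈ V, v ∈ acc.2) ∧ f ∈ acc.2 ∧
  (∀ u ∈ acc.2, u ∉ V → u ≠ f → ∀ d ∈ depsOf g u, d ∈ acc.2) ∧
  (∀ u ∈ acc.2, u ∉ V → AR g V f u) ∧
  (∀ x, x ∈ acc.1 ↔ (x ∈ depsOf g f ∨ ∃ u, u ∈ acc.2 ∧ u ∉ V ∧ u ≠ f ∧ x ∈ depsOf g u)) ∧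
  ((U.filter (fun u => decide (u ∉ acc.2))).length < fuel)

def GSpec (g : List (String × List String)) (fuel : Nat) (f : String)
    (V : PySem.Set String) : Prop :=
  (∀ v ∈ V, v ∈ (gatd fuel g f V).2) ∧ f ∈ (gatd fuel g f V).2 ∧
  (∀ u ∈ (gatd fuel g f V).2, u ∉ V →
      ((∀ d ∈ depsOf g u, d ∈ (gatd fuel g f V).2) ∧ AR g V f u)) ∧
  (∀ x, x ∈ (gatd fuel g f V).1 ↔ ∃ u, u ∈ (gatd fuel g f V).2 ∧ u ∉ V ∧ x ∈ depsOf g u)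

lemma gatd_fold_aux (g : List (String × List String)) (U : List String)
    (hU : ∀ u, ∀ x ∈ depsOf g u, x ∈ U)
    (fuel : Nat) (f : String) (V : PySem.Set String) (hfV : f ∉ V)
    (ih : ∀ f' (V' : PySem.Set String), f' ∈ U →
        (U.filter (fun u => decide (u ∉ V'))).length < fuel → GSpec g fuel f' V') :
    ∀ (L : List String) (acc : PySem.Set String × PySem.Set String),
      (∀ d ∈ L, d ∈ depsOf g f) → GInv g U fuel f V acc →
      GInv g U fuel f V (L.foldl (fun acc dep =>
          let r := gatd fuel g dep acc.2
          (PySem.Set.union acc.1 r.1, r.2)) acc) ∧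
      (∀ d ∈ L, d ∈ (L.foldl (fun acc dep =>
          let r := gatd fuel g dep acc.2
          (PySem.Set.union acc.1 r.1, r.2)) acc).2) ∧
      (∀ v ∈ acc.2, v ∈ (L.foldl (fun acc dep =>
          let r := gatd fuel g dep acc.2
          (PySem.Set.union acc.1 r.1, r.2)) acc).2) := by
  intro L
  induction L with
  | nil => intro acc _ hinv; exact ⟨hinv, by simp, fun v hv => by simpa using hv⟩
  | cons d t iht =>
    intro acc hdl hinv
    obtain ⟨i1, i2, i3, i4, i5, i6⟩ := hinv
    have hdf : d ∈ depsOf g f := hdl d (by simp)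
    have hdU : d ∈ U := hU f d hdf
    have hspec := ih d acc.2 hdU i6
    obtain ⟨s1, s2, s3, s4⟩ := hspec
    set r := gatd fuel g d acc.2 with hr
    have hmono : ∀ v ∈ acc.2, v ∈ r.2 := s1
    -- invariant for the new accumulator
    have hinv' : GInv g U fuel f V (PySem.Set.union acc.1 r.1, r.2) := by
      refine ⟨fun v hv => hmono v (i1 v hv), hmono f i2, ?_, ?_, ?_, ?_⟩
      · -- closedness except f
        intro u hu huV huf dd hdd
        by_cases hacc : u ∈ acc.2
        · exact hmono _ (i3 u hacc huV huf dd hdd)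
        · exact (s3 u hu hacc).1 dd hdd
      · -- soundness
        intro u hu huV
        by_cases hacc : u ∈ acc.2
        · exact i4 u hacc huV
        · have har : AR g acc.2 d u := (s3 u hu hacc).2
          have hdV : d ∉ acc.2 := AR_start har
          exact AR_append (AR.refl hfV) hdf (fun hm => hdV (i1 d hm) |>.elim) i1 har
      · -- characterisation of the first component
        intro x
        constructor
        · intro hx
          rcases (PySem.Set.mem_union _ _ _).1 hx with hx | hx
          · rcases (i5 x).1 hx with h | ⟨u, hu, huV, huf, hxd⟩
            · exact Or.inl h
            · exact Or.inr ⟨u, hmono u hu, huV, huf, hxd⟩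
          · rcases (s4 x).1 hx with ⟨u, hu, huacc, hxd⟩
            refine Or.inr ⟨u, hu, fun hm => huacc (i1 u hm), fun he => huacc (he ▸ i2), hxd⟩
        · intro hx
          apply (PySem.Set.mem_union _ _ _).2
          rcases hx with h | ⟨u, hu, huV, huf, hxd⟩
          · exact Or.inl ((i5 x).2 (Or.inl h))
          · by_cases hacc : u ∈ acc.2
            · exact Or.inl ((i5 x).2 (Or.inr ⟨u, hacc, huV, huf, hxd⟩))
            · exact Or.inr ((s4 x).2 ⟨u, hu, hacc, hxd⟩)
      · -- fuel bookkeeping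
        calc (U.filter (fun u => decide (u ∉ r.2))).length
            ≤ (U.filter (fun u => decide (u ∉ acc.2))).length :=
              length_filter_le_of_imp U (fun x hx => by
                simp only [decide_eq_true_eq] at *
                exact fun hm => hx (hmono x hm))
          _ < fuel := i6
    have hres := iht (PySem.Set.union acc.1 r.1, r.2) (fun dd hdd => hdl dd (by simp [hdd])) hinv'
    refine ⟨hres.1, ?_, fun v hv => hres.2.2 v (hmono v hv)⟩
    intro dd hdd
    rcases List.mem_cons.1 hdd with rfl | hdt
    · exact hres.2.2 _ s2
    · exact hres.2.1 dd hdt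
lemma gatd_spec (g : List (String × List String)) (U : List String)
    (hU : ∀ u, ∀ x ∈ depsOf g u, x ∈ U) :
    ∀ (fuel : Nat) (f : String) (V : PySem.Set String), f ∈ U →
      (U.filter (fun u => decide (u ∉ V))).length < fuel → GSpec g fuel f V := by
  intro fuel
  induction fuel with
  | zero => intro f V _ h; omega
  | succ fuel ih =>
    intro f V hfU hfuel
    by_cases hv : f ∈ V
    · have hg : gatd (fuel + 1) g f V = (PySem.Set.empty, V) := by
        simp [gatd, hv, PySem.Set.empty]
      refine ⟨?_, ?_, ?_, ?_⟩ <;> rw [hg]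
      · exact fun v hv => hv
      · exact hv
      · exact fun u hu huV => absurd hu huV
      · intro x
        constructor
        · intro hx; exact absurd hx (by simp [PySem.Set.empty])
        · rintro ⟨u, hu, huV, -⟩; exact absurd hu huV
    · have hg : gatd (fuel + 1) g f V = (depsOf g f).foldl
          (fun acc dep =>
            let r := gatd fuel g dep acc.2
            (PySem.Set.union acc.1 r.1, r.2))
          (PySem.Set.ofList (depsOf g f), PySem.Set.add V f) := by
        simp [gatd, hv]
      have hbase : GInv g U fuel f V (PySem.Set.ofList (depsOf g f), PySem.Set.add V f) := by
        refine ⟨?_, ?_, ?_, ?_, ?_, ?_⟩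
        · exact fun v hvv => (PySem.Set.mem_add _ _ _).2 (Or.inl hvv)
        · exact (PySem.Set.mem_add _ _ _).2 (Or.inr rfl)
        · intro u hu huV huf
          rcases (PySem.Set.mem_add _ _ _).1 hu with h | h
          · exact absurd h huV
          · exact absurd h huf
        · intro u hu huV
          rcases (PySem.Set.mem_add _ _ _).1 hu with h | h
          · exact absurd h huV
          · subst h; exact AR.refl hv
        · intro x
          simp only [PySem.Set.mem_ofList]
          constructor
          · exact Or.inl
          · rintro (h | ⟨u, hu, huV, huf, hxd⟩)
            · exact h
            · rcases (PySem.Set.mem_add _ _ _).1 hu with h | h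
              · exact absurd h huV
              · exact absurd h huf
        · have : (U.filter (fun u => decide (u ∉ PySem.Set.add V f))).length
              < (U.filter (fun u => decide (u ∉ V))).length := by
            refine length_filter_lt_of_imp (a := f) ?_ hfU ?_ ?_
            · intro x hx
              simp only [decide_eq_true_eq] at *
              exact fun hm => hx ((PySem.Set.mem_add _ _ _).2 (Or.inl hm))
            · simpa using hv
            · simp [PySem.Set.mem_add]
          show (U.filter (fun u => decide (u ∉ PySem.Set.add V f))).length < fuel
          omega
      have hres := gatd_fold_aux g U hU fuel f V hv ih (depsOf g f)
        (PySem.Set.ofList (depsOf g f), PySem.Set.add V f) (fun d hd => hd) hbase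
      unfold GSpec
      rw [hg]
      obtain ⟨⟨j1, j2, j3, j4, j5, j6⟩, hdeps, hmono⟩ := hres
      refine ⟨j1, j2, ?_, ?_⟩
      · intro u hu huV
        by_cases huf : u = f
        · subst huf
          exact ⟨fun d hd => hdeps d hd, AR.refl huV⟩
        · exact ⟨j3 u hu huV huf, j4 u hu huV⟩
      · intro x
        rw [j5 x]
        constructor
        · rintro (h | ⟨u, hu, huV, huf, hxd⟩)
          · exact ⟨f, j2, hv, h⟩
          · exact ⟨u, hu, huV, hxd⟩
        · rintro ⟨u, hu, huV, hxd⟩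
          by_cases huf : u = f
          · exact Or.inl (huf ▸ hxd)
          · exact Or.inr ⟨u, hu, huV, huf, hxd⟩
-- loop invariant of Source B's while-loop, for the inner for-loop state (stack, seen, redundant)
def BInv (g : List (String × List String)) (U I : List String) (node : String)
    (acc : List String × PySem.Set String × PySem.Set String) : Prop :=
  (∀ s ∈ acc.1, s ∈ acc.2.1) ∧
  (∀ u ∈ acc.2.1, u ∉ acc.1 → u ≠ node → ∀ d ∈ depsOf g u, d ∈ acc.2.1 ∧ d ∈ acc.2.2) ∧
  (∀ x ∈ acc.2.2, ∃ u ∈ acc.2.1, x ∈ depsOf g u) ∧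
  (∀ u ∈ acc.2.1, ∃ i ∈ I, AR g ([] : List String) i u) ∧
  (∀ u ∈ acc.2.1, u ∈ U)

lemma bfs_fold_aux (g : List (String × List String)) (U I : List String)
    (hU : ∀ u, ∀ x ∈ depsOf g u, x ∈ U) (node : String)
    (hnode : ∃ i ∈ I, AR g ([] : List String) i node) :
    ∀ (M : List String) (acc : List String × PySem.Set String × PySem.Set String),
      (∀ d ∈ M, d ∈ depsOf g node) → node ∈ acc.2.1 → BInv g U I node acc →
      BInv g U I node (M.foldl (bstep g node) acc) ∧
      (∀ d ∈ M, d ∈ (M.foldl (bstep g node) acc).2.1 ∧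
        d ∈ (M.foldl (bstep g node) acc).2.2) ∧
      (∀ v ∈ acc.2.1, v ∈ (M.foldl (bstep g node) acc).2.1) ∧
      (∀ x ∈ acc.2.2, x ∈ (M.foldl (bstep g node) acc).2.2) ∧
      ((U.filter (fun u => decide (u ∉ (M.foldl (bstep g node) acc).2.1))).length + (M.foldl (bstep g node) acc).1.length
        ≤ (U.filter (fun u => decide (u ∉ acc.2.1))).length + acc.1.length) := by
  intro M
  induction M with
  | nil =>
    intro acc _ _ hinv
    exact ⟨hinv, by simp, fun v hv => by simpa using hv, fun x hx => by simpa using hx, le_refl _⟩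
  | cons d t iht =>
    intro acc hM hns hinv
    obtain ⟨j1, j2, j3, j4, j5⟩ := hinv
    have hdn : d ∈ depsOf g node := hM d (by simp)
    have hdU : d ∈ U := hU node d hdn
    by_cases hds : d ∈ acc.2.1
    · have hstep : bstep g node acc d = (acc.1, acc.2.1, PySem.Set.add acc.2.2 d) := by
        simp [bstep, hds]
      have hinv' : BInv g U I node (acc.1, acc.2.1, PySem.Set.add acc.2.2 d) := by
        refine ⟨j1, ?_, ?_, j4, j5⟩
        · intro u hu hust hun dd hdd
          exact ⟨(j2 u hu hust hun dd hdd).1,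
            (PySem.Set.mem_add _ _ _).2 (Or.inl (j2 u hu hust hun dd hdd).2)⟩
        · intro x hx
          rcases (PySem.Set.mem_add _ _ _).1 hx with h | h
          · exact j3 x h
          · exact ⟨node, hns, h ▸ hdn⟩
      have hres := iht (acc.1, acc.2.1, PySem.Set.add acc.2.2 d)
        (fun dd hdd => hM dd (by simp [hdd])) hns hinv'
      rw [List.foldl_cons, hstep]
      refine ⟨hres.1, ?_, hres.2.2.1, ?_, ?_⟩
      · intro dd hdd
        rcases List.mem_cons.1 hdd with rfl | hdt
        · exact ⟨hres.2.2.1 _ hds,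
            hres.2.2.2.1 _ ((PySem.Set.mem_add _ _ _).2 (Or.inr rfl))⟩
        · exact hres.2.1 dd hdt
      · intro x hx
        exact hres.2.2.2.1 x ((PySem.Set.mem_add _ _ _).2 (Or.inl hx))
      · exact hres.2.2.2.2
    · have hstep : bstep g node acc d = (acc.1 ++ [d], PySem.Set.add acc.2.1 d, PySem.Set.add acc.2.2 d) := by
        simp [bstep, hds]
      have hinv' : BInv g U I node (acc.1 ++ [d], PySem.Set.add acc.2.1 d, PySem.Set.add acc.2.2 d) := by
        refine ⟨?_, ?_, ?_, ?_, ?_⟩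
        · intro s hs
          rcases List.mem_append.1 hs with h | h
          · exact (PySem.Set.mem_add _ _ _).2 (Or.inl (j1 s h))
          · exact (PySem.Set.mem_add _ _ _).2 (Or.inr (List.mem_singleton.1 h))
        · intro u hu hust hun dd hdd
          have hud : u ≠ d := by
            intro he; exact hust (he ▸ (List.mem_append.2 (Or.inr (by simp))))
          have hu' : u ∈ acc.2.1 := by
            rcases (PySem.Set.mem_add _ _ _).1 hu with h | h
            · exact h
            · exact absurd h hud
          have hust' : u ∉ acc.1 := fun h => hust (List.mem_append.2 (Or.inl h))
          exact ⟨(PySem.Set.mem_add _ _ _).2 (Or.inl (j2 u hu' hust' hun dd hdd).1),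
            (PySem.Set.mem_add _ _ _).2 (Or.inl (j2 u hu' hust' hun dd hdd).2)⟩
        · intro x hx
          rcases (PySem.Set.mem_add _ _ _).1 hx with h | h
          · obtain ⟨u, hu, hxu⟩ := j3 x h
            exact ⟨u, (PySem.Set.mem_add _ _ _).2 (Or.inl hu), hxu⟩
          · exact ⟨node, (PySem.Set.mem_add _ _ _).2 (Or.inl hns), h ▸ hdn⟩
        · intro u hu
          rcases (PySem.Set.mem_add _ _ _).1 hu with h | h
          · exact j4 u h
          · obtain ⟨i, hi, har⟩ := hnode
            exact ⟨i, hi, AR.tail har (h ▸ hdn) (by simp)⟩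
        · intro u hu
          rcases (PySem.Set.mem_add _ _ _).1 hu with h | h
          · exact j5 u h
          · exact h ▸ hdU
      have hres := iht (acc.1 ++ [d], PySem.Set.add acc.2.1 d, PySem.Set.add acc.2.2 d)
        (fun dd hdd => hM dd (by simp [hdd])) ((PySem.Set.mem_add _ _ _).2 (Or.inl hns)) hinv'
      rw [List.foldl_cons, hstep]
      refine ⟨hres.1, ?_, ?_, ?_, ?_⟩
      · intro dd hdd
        rcases List.mem_cons.1 hdd with rfl | hdt
        · exact ⟨hres.2.2.1 _ ((PySem.Set.mem_add _ _ _).2 (Or.inr rfl)),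
            hres.2.2.2.1 _ ((PySem.Set.mem_add _ _ _).2 (Or.inr rfl))⟩
        · exact hres.2.1 dd hdt
      · intro v hv
        exact hres.2.2.1 v ((PySem.Set.mem_add _ _ _).2 (Or.inl hv))
      · intro x hx
        exact hres.2.2.2.1 x ((PySem.Set.mem_add _ _ _).2 (Or.inl hx))
      · refine le_trans hres.2.2.2.2 ?_
        have hlt : (U.filter (fun u => decide (u ∉ PySem.Set.add acc.2.1 d))).length
            < (U.filter (fun u => decide (u ∉ acc.2.1))).length := by
          refine length_filter_lt_of_imp (a := d) ?_ hdU ?_ ?_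
          · intro x hx
            simp only [decide_eq_true_eq] at *
            exact fun hm => hx ((PySem.Set.mem_add _ _ _).2 (Or.inl hm))
          · simpa using hds
          · simp [PySem.Set.mem_add]
        simp only [List.length_append, List.length_cons, List.length_nil]
        omega
lemma bfs_spec (g : List (String × List String)) (U I : List String)
    (hU : ∀ u, ∀ x ∈ depsOf g u, x ∈ U) :
    ∀ (fuel : Nat) (stack : List String) (sn rd : PySem.Set String),
      (∀ s ∈ stack, s ∈ sn) →
      (∀ u ∈ sn, u ∉ stack → ∀ d ∈ depsOf g u, d ∈ sn ∧ d ∈ rd) →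
      (∀ x ∈ rd, ∃ u ∈ sn, x ∈ depsOf g u) →
      (∀ u ∈ sn, ∃ i ∈ I, AR g ([] : List String) i u) →
      (∀ u ∈ sn, u ∈ U) →
      (∀ i ∈ I, i ∈ sn) →
      (U.filter (fun u => decide (u ∉ sn))).length + stack.length < fuel →
      ∀ x, x ∈ bfsRed fuel g stack sn rd ↔
        ∃ u, (∃ i ∈ I, AR g ([] : List String) i u) ∧ x ∈ depsOf g u := by
  intro fuel
  induction fuel with
  | zero => intro stack sn rd _ _ _ _ _ _ h; omega
  | succ fuel ih =>
    intro stack sn rd i1 i2 i3 i4 i5 i6 hfuel x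
    rcases List.eq_nil_or_concat stack with rfl | ⟨ys, y, rfl⟩
    · have hb : bfsRed (fuel+1) g [] sn rd = rd := by
        simp [bfsRed, PySem.List.pop?]
      rw [hb]
      constructor
      · intro hx
        obtain ⟨u, hu, hxu⟩ := i3 x hx
        exact ⟨u, i4 u hu, hxu⟩
      · rintro ⟨u, ⟨i, hi, har⟩, hxu⟩
        have hu : u ∈ sn :=
          AR_closed (fun w hw _ d hd => (i2 w hw (by simp) d hd).1) (i6 i hi) har
        exact (i2 u hu (by simp) x hxu).2
    · simp only [List.concat_eq_append] at i1 i2 hfuel ⊢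
      have hns : y ∈ sn := i1 y (by simp)
      have hres := bfs_fold_aux g U I hU y (i4 y hns) (depsOf g y) (ys, sn, rd)
        (fun d hd => hd) hns
        ⟨fun s hs => i1 s (by simp [hs]),
         fun u hu hust hun d hd => i2 u hu (by
            intro hm
            rcases List.mem_append.1 hm with h | h
            · exact hust h
            · exact hun (List.mem_singleton.1 h)) d hd,
         i3, i4, i5⟩
      set F := (depsOf g y).foldl (bstep g y) (ys, sn, rd) with hF
      obtain ⟨⟨j1, j2, j3, j4, j5⟩, hdeps, hsn, hrd, hmeas⟩ := hres
      dsimp only at hmeas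
      have hb : bfsRed (fuel+1) g (ys ++ [y]) sn rd = bfsRed fuel g F.1 F.2.1 F.2.2 := by
        simp [bfsRed, PySem.List.pop?_last, hF]
      rw [hb]
      refine ih F.1 F.2.1 F.2.2 j1 ?_ j3 j4 j5 (fun i hi => hsn i (i6 i hi)) ?_ x
      · intro u hu hust d hd
        by_cases huy : u = y
        · exact hdeps d (huy ▸ hd)
        · exact j2 u hu hust huy d hd
      · simp only [List.length_append, List.length_cons, List.length_nil] at hfuel
        omega
lemma depsOf_subset_flat (g : List (String × List String)) (u : String) :
    ∀ x ∈ depsOf g u, x ∈ g.flatMap (fun p => p.2) := by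
  intro x hx
  unfold depsOf at hx
  cases h : g.find? (fun p => p.1 == u) with
  | none => rw [h] at hx; simp at hx
  | some p =>
    rw [h] at hx
    simp only [Option.map_some, Option.getD_some] at hx
    exact List.mem_flatMap.2 ⟨p, List.mem_of_find?_eq_some h, hx⟩

lemma gatd_top (g : List (String × List String)) (inc : String)
    (hinc : inc ∈ g.flatMap (fun p => p.2)) :
    ∀ x, x ∈ (gatd ((g.flatMap (fun p => p.2)).length + 1) g inc PySem.Set.empty).1 ↔
      ∃ u, AR g ([] : List String) inc u ∧ x ∈ depsOf g u := by
  have hfuel : ((g.flatMap (fun p => p.2)).filter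
      (fun u => decide (u ∉ PySem.Set.empty))).length
      < (g.flatMap (fun p => p.2)).length + 1 := by
    have := List.length_filter_le (fun u => decide (u ∉ PySem.Set.empty))
      (g.flatMap (fun p => p.2))
    omega
  obtain ⟨s1, s2, s3, s4⟩ := gatd_spec g (g.flatMap (fun p => p.2)) (depsOf_subset_flat g)
    ((g.flatMap (fun p => p.2)).length + 1) inc PySem.Set.empty hinc hfuel
  intro x
  rw [s4 x]
  constructor
  · rintro ⟨u, hu, huV, hxd⟩
    exact ⟨u, (s3 u hu huV).2, hxd⟩
  · rintro ⟨u, har, hxd⟩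
    have hu : u ∈ (gatd ((g.flatMap (fun p => p.2)).length + 1) g inc PySem.Set.empty).2 :=
      AR_closed (fun w hw hwV d hd => (s3 w hw hwV).1 d hd) s2 har
    exact ⟨u, hu, by simp [PySem.Set.empty], hxd⟩

lemma mem_unionFold (g : List (String × List String)) (fuel : Nat) :
    ∀ (L : List String) (s : PySem.Set String) (x : String),
      x ∈ L.foldl (fun s inc => PySem.Set.union s (gatd fuel g inc PySem.Set.empty).1) s ↔
        x ∈ s ∨ ∃ inc ∈ L, x ∈ (gatd fuel g inc PySem.Set.empty).1 := by
  intro L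
  induction L with
  | nil => intro s x; simp
  | cons a t ih =>
    intro s x
    rw [List.foldl_cons, ih]
    rw [PySem.Set.mem_union]
    constructor
    · rintro ((h | h) | ⟨i, hi, h⟩)
      · exact Or.inl h
      · exact Or.inr ⟨a, by simp, h⟩
      · exact Or.inr ⟨i, by simp [hi], h⟩
    · rintro (h | ⟨i, hi, h⟩)
      · exact Or.inl (Or.inl h)
      · rcases List.mem_cons.1 hi with rfl | hit
        · exact Or.inl (Or.inr h)
        · exact Or.inr ⟨i, hit, h⟩

lemma bfs_top (g : List (String × List String)) (includes : List String)
    (hinc : ∀ i ∈ includes, i ∈ g.flatMap (fun p => p.2)) :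
    ∀ x, x ∈ bfsRed ((g.flatMap (fun q => q.2)).length + includes.length + 1) g includes
        (PySem.Set.ofList includes) PySem.Set.empty ↔
      ∃ u, (∃ i ∈ includes, AR g ([] : List String) i u) ∧ x ∈ depsOf g u := by
  intro x
  refine bfs_spec g (g.flatMap (fun q => q.2)) includes (depsOf_subset_flat g) _
    includes (PySem.Set.ofList includes) PySem.Set.empty
    (fun s hs => (PySem.Set.mem_ofList _ _).2 hs) ?_ ?_ ?_ ?_
    (fun i hi => (PySem.Set.mem_ofList _ _).2 hi) ?_ x
  · intro u hu hust
    exact absurd ((PySem.Set.mem_ofList _ _).1 hu) hust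
  · intro y hy
    exact absurd hy (by simp [PySem.Set.empty])
  · intro u hu
    exact ⟨u, (PySem.Set.mem_ofList _ _).1 hu, AR.refl (by simp)⟩
  · intro u hu
    exact hinc u ((PySem.Set.mem_ofList _ _).1 hu)
  · have := List.length_filter_le (fun u => decide (u ∉ PySem.Set.ofList includes))
      (g.flatMap (fun q => q.2))
    omega

lemma value_eq (g : List (String × List String)) (includes : List String)
    (hinc : ∀ i ∈ includes, i ∈ g.flatMap (fun p => p.2)) :
    includes.filter (fun inc => !(PySem.Set.contains
      (includes.foldl (fun s i => PySem.Set.union s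
        (gatd ((g.flatMap (fun p => p.2)).length + 1) g i PySem.Set.empty).1) PySem.Set.empty) inc)) =
    includes.filter (fun inc => !(PySem.Set.contains
      (bfsRed ((g.flatMap (fun q => q.2)).length + includes.length + 1) g includes
        (PySem.Set.ofList includes) PySem.Set.empty) inc)) := by
  apply List.filter_congr
  intro inc hincm
  have hiff : ∀ x, x ∈ (includes.foldl (fun s i => PySem.Set.union s
      (gatd ((g.flatMap (fun p => p.2)).length + 1) g i PySem.Set.empty).1) PySem.Set.empty) ↔
      x ∈ bfsRed ((g.flatMap (fun q => q.2)).length + includes.length + 1) g includes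
        (PySem.Set.ofList includes) PySem.Set.empty := by
    intro x
    rw [mem_unionFold, bfs_top g includes hinc x]
    constructor
    · rintro (h | ⟨i, hi, h⟩)
      · exact absurd h (by simp [PySem.Set.empty])
      · obtain ⟨u, har, hxd⟩ := (gatd_top g i (hinc i hi) x).1 h
        exact ⟨u, ⟨i, hi, har⟩, hxd⟩
    · rintro ⟨u, ⟨i, hi, har⟩, hxd⟩
      exact Or.inr ⟨i, hi, (gatd_top g i (hinc i hi) x).2 ⟨u, har, hxd⟩⟩
  congr 1
  have h1 := hiff inc
  by_cases h : inc ∈ (includes.foldl (fun s i => PySem.Set.union s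
      (gatd ((g.flatMap (fun p => p.2)).length + 1) g i PySem.Set.empty).1) PySem.Set.empty)
  · rw [(PySem.Set.contains_iff _ _).2 h, (PySem.Set.contains_iff _ _).2 (h1.1 h)]
  · have h2 : inc ∉ bfsRed ((g.flatMap (fun q => q.2)).length + includes.length + 1) g includes
        (PySem.Set.ofList includes) PySem.Set.empty := fun hm => h (h1.2 hm)
    rw [Bool.eq_iff_iff]
    simp only [PySem.Set.contains_eq_listContains]
    constructor <;> intro hc
    · exact absurd (by simpa using hc) h
    · exact absurd (by simpa using hc) h2

theorem rri_eq (graph : List (String × List String)) :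
    remove_redundant_includes graph = remove_redundant_includes_alt graph := by
  unfold remove_redundant_includes remove_redundant_includes_alt
  congr 1
  have hgen : ∀ (L : List (String × List String)) (acc : PySem.Dict String (List String)),
      (∀ p ∈ L, ∀ i ∈ p.2, i ∈ graph.flatMap (fun q => q.2)) →
      L.foldl (fun og p =>
        og.insert p.1 (p.2.filter (fun inc => !(PySem.Set.contains
          (p.2.foldl (fun s inc => PySem.Set.union s
            (gatd ((graph.flatMap (fun q => q.2)).length + 1) graph inc PySem.Set.empty).1)
            PySem.Set.empty) inc)))) acc =
      L.foldl (fun og p =>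
        og.insert p.1 (p.2.filter (fun inc => !(PySem.Set.contains
          (bfsRed ((graph.flatMap (fun q => q.2)).length + p.2.length + 1) graph p.2
            (PySem.Set.ofList p.2) PySem.Set.empty) inc)))) acc := by
    intro L
    induction L with
    | nil => intro acc _; rfl
    | cons p t ih =>
      intro acc hL
      rw [List.foldl_cons, List.foldl_cons, value_eq graph p.2 (hL p (by simp))]
      exact ih _ (fun q hq => hL q (by simp [hq]))
  exact hgen graph PySem.Dict.empty
    (fun p hp i hi => List.mem_flatMap.2 ⟨p, hp, hi⟩)

-- ===== VERDICT (by name: the statement is the Claim_ definition above) =====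
theorem remove_redundant_includes_spec : Claim_equal_remove_redundant_includes := by
  intro graph _
  show remove_redundant_includes graph = remove_redundant_includes_alt graph
  exact rri_eq graph
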